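-- pv_equiv track=rewrite | github.com/zeya30/uqlm | uqlm/utils/postprocessors.py | math_postprocessor
-- ===== SOURCE A (Python) =====
-- def math_postprocessor(input_string: str) -> str:
--     """
--     Parameters
--     ----------
--
--     input_string: str
--         The string from which the numerical answer will be extracted. Only the integer part is extracted.
--
--     Returns
--     -------
--     str
--         The postprocessed string containing the integer part of the answer.
--     """
--     result = ""
--     for char in input_string:
--         if char.isdigit():
--             result += char
--         elif char == ".":
--             break
--     return result
-- ===== SOURCE B (Python) =====
-- def math_postprocessor(input_string: str) -> str:
--     dot = input_string.find(".")
--     end = len(input_string) if dot == -1 else dot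
--     result = ""
--     i = end - 1
--     while i >= 0:
--         ch = input_string[i]
--         if ch.isdigit():
--             result = ch + result
--         i -= 1
--     return result
-- ===== Notes on version B (the rewrite author's own statement) =====
-- stated objective: alternative
-- what changed: B replaces A's forward accumulate-and-break for-loop with: precompute the boundary via str.find of the period, then an index-based while loop that walks the prefix RIGHT-TO-LEFT and builds the result back-to-front by prepending digits.
import Mathlib
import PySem

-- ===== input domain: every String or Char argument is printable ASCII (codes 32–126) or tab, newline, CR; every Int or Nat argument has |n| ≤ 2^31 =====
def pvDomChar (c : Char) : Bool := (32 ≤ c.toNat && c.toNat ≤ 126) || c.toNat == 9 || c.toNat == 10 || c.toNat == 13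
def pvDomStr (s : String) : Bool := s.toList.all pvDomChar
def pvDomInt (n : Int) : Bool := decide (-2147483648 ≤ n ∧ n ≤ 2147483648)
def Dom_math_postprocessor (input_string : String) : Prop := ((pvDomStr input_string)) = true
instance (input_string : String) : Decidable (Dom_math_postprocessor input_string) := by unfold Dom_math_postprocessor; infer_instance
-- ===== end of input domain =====

-- B replaces A's forward accumulate-and-break loop by: precompute the boundary with find('.'),
-- then a right-to-left index loop building the result back-to-front (alternative; same cost).

-- ===== PORT A =====
-- the for-loop with its break: structural recursion over the characters, accumulating digits, stopping at '.'
def mpALoop : List Char → List Char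
  | [] => []
  | c :: rest =>
      if PySem.Chars.isdigit c then c :: mpALoop rest
      else if c = '.' then [] else mpALoop rest

def math_postprocessor (input_string : String) : String :=
  String.mk (mpALoop input_string.toList)

-- ===== PORT B =====
-- the 'while i >= 0' loop: i counts down from end-1 to 0; 'result = ch + result' prepends
-- (index i here is the Nat i+1 - 1; s[i] with 0 ≤ i < len is List.getD, exact on that range)
def mpBLoop (l : List Char) : Nat → List Char → List Char
  | 0, acc => acc
  | i + 1, acc =>
      let ch := l.getD i ' '
      mpBLoop l i (if PySem.Chars.isdigit ch then ch :: acc else acc)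

def math_postprocessor_alt (input_string : String) : String :=
  let dot : Int := PySem.Str.find input_string "."
  let endN : Nat := if dot = -1 then input_string.toList.length else dot.toNat
  String.mk (mpBLoop input_string.toList endN [])

-- ===== PRECONDITION & SPEC =====
def Spec_math_postprocessor (input_string : String) (out : String) : Prop := out = math_postprocessor_alt input_string
instance (input_string : String) (out : String) : Decidable (Spec_math_postprocessor input_string out) := by unfold Spec_math_postprocessor; infer_instance

-- ===== CLAIM (what is proved, stated in full; the proofs are below) =====
def Claim_equal_math_postprocessor : Prop := ∀ (input_string : String), Dom_math_postprocessor input_string → Spec_math_postprocessor input_string (math_postprocessor input_string)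

-- ===== LEMMAS AND PROOFS =====

-- A's loop computes: take the prefix before the first '.', keep the digits
lemma mpALoop_eq (l : List Char) :
    mpALoop l = (l.takeWhile (fun c => !(c = '.'))).filter PySem.Chars.isdigit := by
  induction l with
  | nil => rfl
  | cons c rest ih =>
    by_cases hd : PySem.Chars.isdigit c
    · have hc : ¬ c = '.' := by
        intro h; subst h; simp [PySem.Chars.isdigit] at hd
      simp [mpALoop, hd, List.takeWhile, hc, ih]
    · by_cases hc : c = '.'
      · subst hc; simp [mpALoop, hd, List.takeWhile]
      · simp [mpALoop, hd, hc, List.takeWhile, ih]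

-- B's countdown loop computes: keep the digits of the first n characters, in order, before acc
lemma mpBLoop_eq (l : List Char) (n : Nat) (hn : n ≤ l.length) (acc : List Char) :
    mpBLoop l n acc = (l.take n).filter PySem.Chars.isdigit ++ acc := by
  induction n generalizing acc with
  | zero => simp [mpBLoop]
  | succ i ih =>
    have hi : i < l.length := by omega
    have hget : l.getD i ' ' = l[i] := List.getD_eq_getElem l ' ' hi
    have htake : l.take (i + 1) = l.take i ++ [l[i]] := by
      rw [List.take_add_one, List.getElem?_eq_getElem hi]; rfl
    rw [mpBLoop]
    simp only [hget]
    rw [ih (by omega), htake, List.filter_append]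
    by_cases hd : PySem.Chars.isdigit l[i] <;> simp [hd]

-- a singleton prefix of a drop is exactly 'the character there is that one'
lemma singleton_prefix_drop (l : List Char) (i : Nat) (a : Char) :
    [a] <+: l.drop i ↔ ∃ h : i < l.length, l[i] = a := by
  constructor
  · rintro ⟨t, ht⟩
    have hlen : i < l.length := by
      by_contra h
      have : l.drop i = [] := List.drop_eq_nil_of_le (by omega)
      rw [this] at ht; simp at ht
    refine ⟨hlen, ?_⟩
    have hh : (l.drop i).head? = some a := by rw [← ht]; rfl
    rw [List.drop_eq_getElem_cons hlen] at hh
    simpa [List.getElem?_eq_getElem hlen] using hh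
  · rintro ⟨h, rfl⟩
    have hd : l.drop i = l[i] :: l.drop (i + 1) := List.drop_eq_getElem_cons h
    exact ⟨l.drop (i + 1), by rw [hd]; rfl⟩

-- the takeWhile prefix equals a take whose bound is the first failure point (or the length)
lemma takeWhile_eq_take_of (p : Char → Bool) (l : List Char) (n : Nat) (hn : n ≤ l.length)
    (h1 : ∀ i (hi : i < n), p (l[i]'(lt_of_lt_of_le hi hn)) = true)
    (h2 : ∀ h : n < l.length, p (l[n]) = false) :
    l.takeWhile p = l.take n := by
  induction l generalizing n with
  | nil => simp
  | cons c rest ih =>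
    cases n with
    | zero =>
      have := h2 (by simp)
      simp only [List.getElem_cons_zero] at this
      simp [List.takeWhile, this]
    | succ m =>
      have hc : p c = true := by simpa using h1 0 (by omega)
      simp only [List.takeWhile, hc, List.take_succ_cons]
      congr 1
      exact ih m (by simpa using hn)
        (fun i hi => by simpa using h1 (i + 1) (by omega))
        (fun h => by simpa using h2 (by simpa using h))

-- the boundary B computes from find('.') is the length of the no-period prefix A scans
lemma endN_take (l : List Char) :
    (if PySem.Chars.find l ['.'] = -1 then l.length else (PySem.Chars.find l ['.']).toNat) = n →
    l.take n = l.takeWhile (fun c => !(c = '.')) := by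
  intro hn
  by_cases hf : PySem.Chars.find l ['.'] = -1
  · have hnin : '.' ∉ l := by
      intro hmem
      obtain ⟨s, t, rfl⟩ := List.append_of_mem hmem
      exact (PySem.Chars.find_eq_neg_one_iff _ _).mp hf ⟨s, t, by simp⟩
    rw [if_pos hf] at hn
    subst hn
    rw [takeWhile_eq_take_of _ _ l.length le_rfl
      (fun i hi => by
        simp only [Bool.not_eq_eq_eq_not, Bool.not_true, decide_eq_false_iff_not]
        intro h; exact hnin (h ▸ List.getElem_mem hi))
      (fun h => absurd h (by omega))]
  · have hge : 0 ≤ PySem.Chars.find l ['.'] := by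
      have := PySem.Chars.neg_one_le_find (s := l) (sub := ['.'])
      omega
    obtain ⟨hpre, hmin⟩ := PySem.Chars.find_spec (s := l) (sub := ['.']) hge
    obtain ⟨hlt, hdot⟩ := (singleton_prefix_drop l _ '.').mp hpre
    rw [if_neg hf] at hn
    subst hn
    rw [takeWhile_eq_take_of _ _ _ (le_of_lt hlt)
      (fun i hi => by
        simp only [Bool.not_eq_eq_eq_not, Bool.not_true, decide_eq_false_iff_not]
        intro h
        exact hmin i hi ((singleton_prefix_drop l i '.').mpr ⟨lt_trans hi hlt, h⟩))
      (fun h => by simp [hdot])]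

-- ===== VERDICT (by name: the statement is the Claim_ definition above) =====
theorem math_postprocessor_spec : Claim_equal_math_postprocessor := by
  intro s _
  unfold Spec_math_postprocessor math_postprocessor math_postprocessor_alt
  simp only [PySem.Str.find_eq]
  have hdot : (".".toList : List Char) = ['.'] := rfl
  rw [hdot]
  set n : Nat := if PySem.Chars.find s.toList ['.'] = -1 then s.toList.length
    else (PySem.Chars.find s.toList ['.']).toNat with hn
  have hnle : n ≤ s.toList.length := by
    have h1 := PySem.Chars.find_le_length (s := s.toList) (sub := ['.'])
    have h2 := PySem.Chars.neg_one_le_find (s := s.toList) (sub := ['.'])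
    rw [hn]; split <;> omega
  have htake := endN_take s.toList hn.symm
  rw [mpALoop_eq, mpBLoop_eq s.toList n hnle [], htake]
  simp
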